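-- pv_equiv track=rewrite | github.com/tundrv0l/Group-12-Prod | backend/solvers/util/methods.py | minimal_elements
-- ===== SOURCE A (Python) =====
-- def minimal_elements(set_, relation):
--     minimals = set()
--     for a in set_:
--         for b in set_ - {a}:
--             if (b, a) in relation:
--                 break
--         else:
--             minimals.add(a)
--
--     return minimals
-- ===== SOURCE B (Python) =====
-- def minimal_elements(set_, relation):
--     # One pass over the relation: any b with (a, b) in relation, a in set_, a != b
--     # is not minimal; the minimal elements are the rest of set_.
--     dominated = {b for (a, b) in relation if a != b and a in set_}
--     return set(set_) - dominated
-- ===== Notes on version B (the rewrite author's own statement) =====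
-- stated objective: faster
-- what changed: Replaced the nested scan (for each element, scan the whole set and test every pair against the relation) by a single pass over the relation collecting dominated elements, then one set difference.
import Mathlib
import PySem

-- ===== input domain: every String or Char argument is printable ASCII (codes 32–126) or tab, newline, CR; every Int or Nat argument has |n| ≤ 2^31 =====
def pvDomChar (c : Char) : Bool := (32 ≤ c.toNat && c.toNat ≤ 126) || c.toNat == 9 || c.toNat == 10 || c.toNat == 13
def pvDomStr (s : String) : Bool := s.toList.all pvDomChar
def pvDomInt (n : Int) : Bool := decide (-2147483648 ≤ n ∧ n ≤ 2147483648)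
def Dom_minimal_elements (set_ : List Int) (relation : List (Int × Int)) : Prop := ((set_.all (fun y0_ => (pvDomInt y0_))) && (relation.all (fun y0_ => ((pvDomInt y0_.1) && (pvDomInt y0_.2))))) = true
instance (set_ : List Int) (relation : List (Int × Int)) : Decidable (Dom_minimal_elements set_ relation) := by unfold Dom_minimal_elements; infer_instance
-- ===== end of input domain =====

-- B replaces A's nested scan by one pass over the relation collecting dominated
-- elements and a set difference (asymptotically faster; return values equal as sets,
-- here proved equal as the lists both ports produce).

-- ===== PORT A =====
-- for a in set_: for b in set_ - {a}: if (b,a) in relation: break; else: minimals.add(a)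
-- (the for/break/else decides existence, ported as List.any — order-independent)
def minimal_elements (set_ : List Int) (relation : List (Int × Int)) : List Int :=
  (PySem.Set.ofList set_).foldl
    (fun minimals a =>
      if (PySem.Set.diff (PySem.Set.ofList set_) [a]).any (fun b => decide ((b, a) ∈ relation)) then
        minimals
      else PySem.Set.add minimals a)
    PySem.Set.empty

-- ===== PORT B =====
-- dominated = {b for (a, b) in relation if a != b and a in set_}; return set(set_) - dominated
def minimal_elements_alt (set_ : List Int) (relation : List (Int × Int)) : List Int :=
  let dominated : PySem.Set Int :=
    relation.foldl
      (fun acc p => if p.1 ≠ p.2 ∧ p.1 ∈ set_ then PySem.Set.add acc p.2 else acc)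
      PySem.Set.empty
  PySem.Set.diff (PySem.Set.ofList set_) dominated

-- ===== PRECONDITION & SPEC =====
def Spec_minimal_elements (set_ : List Int) (relation : List (Int × Int)) (out : List Int) : Prop := out = minimal_elements_alt set_ relation
instance (set_ : List Int) (relation : List (Int × Int)) (out : List Int) : Decidable (Spec_minimal_elements set_ relation out) := by unfold Spec_minimal_elements; infer_instance

-- ===== CLAIM (what is proved, stated in full; the proofs are below) =====
def Claim_equal_minimal_elements : Prop := ∀ (set_ : List Int) (relation : List (Int × Int)), Dom_minimal_elements set_ relation → Spec_minimal_elements set_ relation (minimal_elements set_ relation)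

-- ===== LEMMAS AND PROOFS =====

/-- membership in B's `dominated` set. -/
lemma mem_dominated (set_ : List Int) (relation : List (Int × Int)) (x : Int) (acc : PySem.Set Int) :
    x ∈ relation.foldl
          (fun acc p => if p.1 ≠ p.2 ∧ p.1 ∈ set_ then PySem.Set.add acc p.2 else acc) acc
      ↔ x ∈ acc ∨ ∃ p ∈ relation, p.1 ≠ p.2 ∧ p.1 ∈ set_ ∧ p.2 = x := by
  induction relation generalizing acc with
  | nil => simp
  | cons q l ih =>
      simp only [List.foldl_cons, ih]
      by_cases h : q.1 ≠ q.2 ∧ q.1 ∈ set_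
      · simp [h, PySem.Set.mem_add]
        tauto
      · simp only [if_neg h, List.mem_cons]
        constructor
        · rintro (hx | ⟨p, hp, h1, h2, h3⟩)
          · exact Or.inl hx
          · exact Or.inr ⟨p, Or.inr hp, h1, h2, h3⟩
        · rintro (hx | ⟨p, (rfl | hp), h1, h2, h3⟩)
          · exact Or.inl hx
          · exact absurd ⟨h1, h2⟩ h
          · exact Or.inr ⟨p, hp, h1, h2, h3⟩

/-- A's conditional-add fold over a nodup list is a filter. -/
lemma fold_add_eq_filter (p : Int → Bool) :
    ∀ (l : List Int) (acc : PySem.Set Int), l.Nodup → (∀ a ∈ l, a ∉ acc) →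
      l.foldl (fun m a => if p a then m else PySem.Set.add m a) acc
        = acc ++ l.filter (fun a => !p a) := by
  intro l
  induction l with
  | nil => simp
  | cons a l ih =>
      intro acc hnd hdisj
      rcases List.nodup_cons.mp hnd with ⟨hal, hndl⟩
      have hna : a ∉ acc := hdisj a (List.mem_cons_self ..)
      simp only [List.foldl_cons]
      by_cases hpa : p a = true
      · rw [if_pos hpa, ih acc hndl (fun b hb => hdisj b (List.mem_cons_of_mem _ hb)),
          List.filter_cons]
        simp [hpa]
      · rw [if_neg hpa, PySem.Set.add_of_not_mem hna,
          ih (acc ++ [a]) hndl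
            (by intro b hb
                simp only [List.mem_append, List.mem_singleton]
                rintro (h | rfl)
                · exact hdisj b (List.mem_cons_of_mem _ hb) h
                · exact hal hb),
          List.filter_cons]
        simp [hpa, List.append_assoc]

theorem minimal_elements_spec : Claim_equal_minimal_elements := by
  intro set_ relation _
  unfold Spec_minimal_elements minimal_elements minimal_elements_alt PySem.Set.diff
  rw [fold_add_eq_filter _ _ PySem.Set.empty (PySem.Set.nodup_ofList set_)
      (by simp [PySem.Set.empty])]
  simp only [PySem.Set.empty, List.nil_append]
  apply List.filter_congr
  intro a ha
  congr 1
  rw [Bool.eq_iff_iff]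
  simp only [List.any_eq_true, List.mem_filter, decide_eq_true_eq,
    PySem.Set.contains_eq_listContains, List.contains_eq_mem, List.mem_singleton,
    Bool.not_eq_true', decide_eq_false_iff_not, mem_dominated,
    List.not_mem_nil, false_or, PySem.Set.mem_ofList]
  constructor
  · rintro ⟨b, ⟨hbs, hba⟩, hrel⟩
    exact ⟨(b, a), hrel, by simpa using hba, hbs, rfl⟩
  · rintro ⟨⟨x, y⟩, hp, h1, h2, rfl⟩
    exact ⟨x, ⟨h2, by simpa using h1⟩, hp⟩
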